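-- pv_equiv track=rewrite | github.com/yunseochnn/Algorithm | 백준/Silver/1010. 다리 놓기/다리 놓기.py | dp
-- ===== SOURCE A (Python) =====
-- def dp(n, m):
--   dp = [[0 for _ in range(m+1)] for _ in range(n+1)]
--
--   for i in range(1, m+1):
--     dp[1][i] = i
--   for i in range(2, n+1):
--     for j in range(i, m+1):
--       for k in range(i, j+1):
--         dp[i][j] += dp[i-1][k-1]
--
--   return dp[n][m]
-- ===== SOURCE B (Python) =====
-- def dp(n, m):
--   # count of bridge pairings = binomial coefficient C(m, n), computed multiplicatively
--   if n > m:
--     return 0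
--   result = 1
--   for i in range(n):
--     result = result * (m - n + i + 1) // (i + 1)
--   return result
-- ===== Notes on version B (the rewrite author's own statement) =====
-- stated objective: faster
-- what changed: Replaces the O(n*m^2) triple-loop DP table with the direct multiplicative computation of the binomial coefficient C(m,n) in a single O(n) loop.
-- intended difference: On the single input (0,0) A returns 0 (row 0 of its table is never filled) while B returns 1, the correct binomial C(0,0) = number of empty pairings. — e.g. on dp(0, 0): A returns 0, B returns 1
import Mathlib
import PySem

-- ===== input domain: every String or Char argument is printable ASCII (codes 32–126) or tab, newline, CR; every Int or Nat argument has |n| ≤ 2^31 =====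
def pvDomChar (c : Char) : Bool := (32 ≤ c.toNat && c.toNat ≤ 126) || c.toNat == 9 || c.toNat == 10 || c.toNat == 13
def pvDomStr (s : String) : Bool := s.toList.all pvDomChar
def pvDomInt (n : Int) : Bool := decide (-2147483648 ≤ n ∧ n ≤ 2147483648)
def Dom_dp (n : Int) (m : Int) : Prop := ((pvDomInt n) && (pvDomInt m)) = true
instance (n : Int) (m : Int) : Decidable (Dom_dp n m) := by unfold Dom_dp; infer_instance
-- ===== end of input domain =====

-- B replaces A's O(n*m^2) triple-loop DP table by the direct multiplicative
-- computation of the binomial coefficient C(m, n) in one O(n) loop.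

-- ===== PORT A =====
def dp (n : Int) (m : Int) : Int :=
  -- dp = [[0 for _ in range(m+1)] for _ in range(n+1)]
  let table : List (List Int) :=
    (PySem.List.pyRange 0 (n+1) 1).map (fun _ => (PySem.List.pyRange 0 (m+1) 1).map (fun _ => (0:Int)))
  -- for i in range(1, m+1): dp[1][i] = i
  let table :=
    (PySem.List.pyRange 1 (m+1) 1).foldl
      (fun t i => PySem.List.pySetD t 1 (PySem.List.pySetD (PySem.List.pyGetD t 1 []) i i)) table
  -- for i in range(2, n+1): for j in range(i, m+1): for k in range(i, j+1): dp[i][j] += dp[i-1][k-1]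
  let table :=
    (PySem.List.pyRange 2 (n+1) 1).foldl (fun t i =>
      (PySem.List.pyRange i (m+1) 1).foldl (fun t j =>
        (PySem.List.pyRange i (j+1) 1).foldl (fun t k =>
          PySem.List.pySetD t i
            (PySem.List.pySetD (PySem.List.pyGetD t i []) j
              (PySem.List.pyGetD (PySem.List.pyGetD t i []) j 0 +
               PySem.List.pyGetD (PySem.List.pyGetD t (i-1) []) (k-1) 0))) t) t) table
  -- return dp[n][m]
  PySem.List.pyGetD (PySem.List.pyGetD table n []) m 0

-- ===== PORT B =====
def dp_alt (n : Int) (m : Int) : Int :=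
  if n > m then 0
  else
    (PySem.List.pyRange 0 n 1).foldl
      (fun r i => PySem.Int.floordiv (r * (m - n + i + 1)) (i + 1)) 1

-- ===== PRECONDITION & SPEC =====
-- Pre_ excludes exactly the inputs on which A raises IndexError: negative n or m
-- (empty table rows/columns), and n = 0 with m ≥ 1 (the first loop writes dp[1][i]
-- but the table has a single row).
def Pre_dp (n : Int) (m : Int) : Prop := 0 ≤ n ∧ 0 ≤ m ∧ (n = 0 → m = 0)
instance (n : Int) (m : Int) : Decidable (Pre_dp n m) := by unfold Pre_dp; infer_instance
def pvWitness_dp : Int × Int := (2, 4)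

-- On the single input (0, 0) A returns 0 (row 0 of its table is never filled) while
-- B returns 1, the correct binomial C(0,0) = number of empty pairings.
def D_dp (n : Int) (m : Int) : Prop := n = 0 ∧ m = 0
instance (n : Int) (m : Int) : Decidable (D_dp n m) := by unfold D_dp; infer_instance
def Spec_dp (n : Int) (m : Int) (out : Int) : Prop := ¬ D_dp n m → out = dp_alt n m
instance (n : Int) (m : Int) (out : Int) : Decidable (Spec_dp n m out) := by unfold Spec_dp; infer_instance
def pvDiffWitness_dp : Int × Int := (0, 0)
def pvDiffWitnessOut_dp : Int × Int := (0, 1)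

-- ===== CLAIM (what is proved, stated in full; the proofs are below) =====
def Claim_unchanged_dp : Prop := ∀ (n : Int) (m : Int), Dom_dp n m → Pre_dp n m → Spec_dp n m (dp n m)
def Claim_changed_dp : Prop := Dom_dp (pvDiffWitness_dp.1) (pvDiffWitness_dp.2) ∧ Pre_dp (pvDiffWitness_dp.1) (pvDiffWitness_dp.2) ∧ D_dp (pvDiffWitness_dp.1) (pvDiffWitness_dp.2) ∧ dp (pvDiffWitness_dp.1) (pvDiffWitness_dp.2) = pvDiffWitnessOut_dp.1 ∧ dp_alt (pvDiffWitness_dp.1) (pvDiffWitness_dp.2) = pvDiffWitnessOut_dp.2 ∧ pvDiffWitnessOut_dp.1 ≠ pvDiffWitnessOut_dp.2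
def Claim_exact_dp : Prop := ∀ (n : Int) (m : Int), Dom_dp n m → Pre_dp n m → D_dp n m → dp n m ≠ dp_alt n m

-- ===== LEMMAS AND PROOFS =====

-- The (N+1) × (M+1) table holding f i j at position (i, j).
def tblF (f : Nat → Nat → Int) (N M : Nat) : List (List Int) :=
  (List.range (N+1)).map (fun i => (List.range (M+1)).map (fun j => f i j))

-- Point update of a two-argument function.
def upd2 (f : Nat → Nat → Int) (a b : Nat) (x : Int) : Nat → Nat → Int :=
  fun i j => if i = a ∧ j = b then x else f i j

theorem getD_map_range' (f : Nat → Int) (n i : Nat) (d : Int) (h : i < n) :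
    ((List.range n).map f).getD i d = f i := by
  rw [List.getD_eq_getElem _ _ (by simpa using h)]; simp

theorem getD_map_range_list (g : Nat → List Int) (n i : Nat) (d : List Int) (h : i < n) :
    ((List.range n).map g).getD i d = g i := by
  rw [List.getD_eq_getElem _ _ (by simpa using h)]; simp

theorem tbl_get (f : Nat → Nat → Int) (N M i j : Nat) (hi : i ≤ N) (hj : j ≤ M) :
    PySem.List.pyGetD (PySem.List.pyGetD (tblF f N M) (i:Int) []) (j:Int) 0 = f i j := by
  simp only [tblF, PySem.List.pyGetD_natCast]
  rw [getD_map_range_list _ _ _ _ (by omega), getD_map_range' _ _ _ _ (by omega)]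

theorem tbl_congr (f g : Nat → Nat → Int) (N M : Nat)
    (h : ∀ i ≤ N, ∀ j ≤ M, f i j = g i j) : tblF f N M = tblF g N M := by
  simp only [tblF]
  refine List.map_congr_left (fun i hi => ?_)
  refine List.map_congr_left (fun j hj => ?_)
  exact h i (by simpa using Nat.lt_succ_iff.mp (List.mem_range.mp hi))
          j (by simpa using Nat.lt_succ_iff.mp (List.mem_range.mp hj))

theorem tbl_set (f : Nat → Nat → Int) (N M a b : Nat) (x : Int) (ha : a ≤ N) (_hb : b ≤ M) :
    PySem.List.pySetD (tblF f N M) (a:Int)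
      (PySem.List.pySetD (PySem.List.pyGetD (tblF f N M) (a:Int) []) (b:Int) x)
    = tblF (upd2 f a b x) N M := by
  have hrow : PySem.List.pyGetD (tblF f N M) (a:Int) [] = (List.range (M+1)).map (fun j => f a j) := by
    simp only [tblF, PySem.List.pyGetD_natCast]
    exact getD_map_range_list _ _ _ _ (by omega)
  rw [hrow]
  simp only [PySem.List.pySetD_natCast, tblF]
  apply List.ext_getElem (by simp)
  intro t h1 h2
  simp only [List.length_map, List.length_range] at h1 h2
  rw [List.getElem_set]
  simp only [List.getElem_map, List.getElem_range]
  by_cases hta : a = t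
  · subst hta
    rw [if_pos rfl]
    apply List.ext_getElem (by simp)
    intro j hj1 hj2
    simp only [List.length_map, List.length_range] at hj1 hj2
    rw [List.getElem_set]
    simp only [List.getElem_map, List.getElem_range, upd2]
    by_cases hjb : b = j
    · subst hjb; simp
    · rw [if_neg hjb, if_neg (by tauto)]
  · rw [if_neg hta]
    refine List.map_congr_left fun j hj => ?_
    simp only [upd2]
    rw [if_neg (by tauto)]

theorem sum_map_range_int (f : Nat → Int) (n : Nat) :
    ((List.range n).map f).sum = ∑ i ∈ Finset.range n, f i := by
  induction n with
  | zero => simp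
  | succ k ih => rw [List.range_succ, Finset.sum_range_succ]; simp [ih]

-- hockey-stick identity in Finset.range form (Pascal's rule step by step)
theorem sum_range_choose_add (a : Nat) : ∀ (c : Nat),
    (∑ t ∈ Finset.range (c+1), (a+t).choose a) = (a+c+1).choose (a+1) := by
  intro c
  induction c with
  | zero => simp
  | succ c ih =>
    rw [Finset.sum_range_succ, ih, show a+(c+1) = a+c+1 from rfl,
      Nat.choose_succ_succ (a+c+1) a]
    ring

-- row 1 after the first loop / completed rows up to p
def rowsF (p : Nat) : Nat → Nat → Int :=
  fun i j => if 1 ≤ i ∧ i ≤ p then ((j.choose i : Nat) : Int) else 0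

-- ===== first loop =====
-- table state while the first loop has written columns 1..t of row 1
def initF (t : Nat) : Nat → Nat → Int :=
  fun i j => if i = 1 ∧ 1 ≤ j ∧ j ≤ t then (j:Int) else 0

theorem loop1_aux (N M : Nat) (hN : 1 ≤ N) : ∀ (t : Nat), t ≤ M →
    (PySem.List.pyRange 1 (1 + (t:Int)) 1).foldl
      (fun t i => PySem.List.pySetD t 1 (PySem.List.pySetD (PySem.List.pyGetD t 1 []) i i))
      (tblF (fun _ _ => 0) N M)
    = tblF (initF t) N M := by
  intro t
  induction t with
  | zero =>
    intro _
    rw [PySem.List.pyRange_one_eq_nil (by omega)]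
    simp only [List.foldl_nil]
    refine congrArg (fun g => tblF g N M) ?_
    funext i j
    simp only [initF]
    rw [if_neg (by omega)]
  | succ t ih =>
    intro ht
    have hsplit : (1 + ((t+1:Nat):Int)) = (1 + (t:Int)) + 1 := by push_cast; ring
    rw [hsplit, PySem.List.pyRange_one_succ_right (by omega), List.foldl_append,
      ih (by omega)]
    simp only [List.foldl_cons, List.foldl_nil]
    have hct : (1 + (t:Int)) = (((1+t:Nat)):Int) := by push_cast; ring
    have hc1 : (1 : Int) = ((1:Nat):Int) := by norm_cast
    rw [hct, hc1, tbl_set _ _ _ _ _ _ (by omega) (by omega)]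
    refine congrArg (fun g => tblF g N M) ?_
    funext i j
    simp only [upd2, initF]
    by_cases h : i = 1 ∧ j = 1 + t
    · rw [if_pos h, if_pos (by omega)]
      push_cast [h.2]; ring
    · rw [if_neg h]
      by_cases h' : i = 1 ∧ 1 ≤ j ∧ j ≤ t
      · rw [if_pos h', if_pos (by omega)]
      · rw [if_neg h', if_neg (by omega)]

theorem loop1 (N M : Nat) (hN : 1 ≤ N) :
    (PySem.List.pyRange 1 ((M:Int)+1) 1).foldl
      (fun t i => PySem.List.pySetD t 1 (PySem.List.pySetD (PySem.List.pyGetD t 1 []) i i))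
      (tblF (fun _ _ => 0) N M)
    = tblF (rowsF 1) N M := by
  have h : ((M:Int)+1) = 1 + (M:Int) := by ring
  rw [h, loop1_aux N M hN M (le_refl M)]
  refine tbl_congr _ _ _ _ (fun i hi j hj => ?_)
  simp only [initF, rowsF]
  by_cases h1 : i = 1
  · subst h1
    rcases Nat.eq_zero_or_pos j with hj0 | hj1
    · subst hj0; simp
    · rw [if_pos (by omega), if_pos (by omega), Nat.choose_one_right]
  · rw [if_neg (by omega), if_neg (by omega)]

-- ===== inner k-loop =====
theorem loopK (N M i j : Nat) (hi1 : 2 ≤ i) (hiN : i ≤ N) (hj : j ≤ M) :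
    ∀ (ks : List Int) (f : Nat → Nat → Int), (∀ k ∈ ks, 1 ≤ k ∧ k ≤ (M:Int) + 1) →
    ks.foldl (fun t k =>
        PySem.List.pySetD t (i:Int)
          (PySem.List.pySetD (PySem.List.pyGetD t (i:Int) []) (j:Int)
            (PySem.List.pyGetD (PySem.List.pyGetD t (i:Int) []) (j:Int) 0 +
             PySem.List.pyGetD (PySem.List.pyGetD t ((i:Int)-1) []) (k-1) 0))) (tblF f N M)
    = tblF (upd2 f i j (f i j + (ks.map (fun k => f (i-1) (k-1).toNat)).sum)) N M := by
  intro ks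
  induction ks with
  | nil =>
    intro f _
    simp only [List.foldl_nil, List.map_nil, List.sum_nil, add_zero]
    refine congrArg (fun g => tblF g N M) ?_
    funext i' j'
    simp only [upd2]
    by_cases h : i' = i ∧ j' = j
    · rw [if_pos h, h.1, h.2]
    · rw [if_neg h]
  | cons k ks ih =>
    intro f hks
    obtain ⟨hk1, hkM⟩ := hks k (List.mem_cons_self ..)
    simp only [List.foldl_cons]
    have hi' : ((i:Int) - 1) = (((i-1:Nat)):Int) := by omega
    have hk' : (k - 1) = (((k-1).toNat : Nat) : Int) := by omega
    have hstep : PySem.List.pySetD (tblF f N M) (i:Int)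
        (PySem.List.pySetD (PySem.List.pyGetD (tblF f N M) (i:Int) []) (j:Int)
          (PySem.List.pyGetD (PySem.List.pyGetD (tblF f N M) (i:Int) []) (j:Int) 0 +
           PySem.List.pyGetD (PySem.List.pyGetD (tblF f N M) ((i:Int)-1) []) (k-1) 0))
        = tblF (upd2 f i j (f i j + f (i-1) (k-1).toNat)) N M := by
      rw [hi', hk', tbl_get _ _ _ _ _ hiN hj, tbl_get _ _ _ _ _ (by omega) (by omega),
        tbl_set _ _ _ _ _ _ hiN hj]
      simp only [Int.toNat_natCast]
    rw [hstep, ih _ (fun k' hk'' => hks k' (List.mem_cons_of_mem _ hk''))]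
    refine congrArg (fun g => tblF g N M) ?_
    have hrow : ∀ x, upd2 f i j (f i j + f (i-1) (k-1).toNat) (i-1) x = f (i-1) x := by
      intro x
      simp only [upd2]
      rw [if_neg (by omega)]
    have h1 : upd2 f i j (f i j + f (i-1) (k-1).toNat) i j = f i j + f (i-1) (k-1).toNat := by
      simp [upd2]
    have h2 : (List.map (fun k' => upd2 f i j (f i j + f (i-1) (k-1).toNat) (i-1) (k'-1).toNat) ks)
        = List.map (fun k' => f (i-1) (k'-1).toNat) ks :=
      List.map_congr_left (fun k' _ => hrow _)
    rw [h1, h2, List.map_cons, List.sum_cons]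
    funext i' j'
    simp only [upd2]
    by_cases h : i' = i ∧ j' = j
    · rw [if_pos h, if_pos h]
      ring
    · rw [if_neg h, if_neg h, if_neg h]

-- ===== middle j-loop =====
-- rows < i done, row i filled for i ≤ j < p
def midF (i p : Nat) : Nat → Nat → Int :=
  fun i' j => if 1 ≤ i' ∧ i' < i then ((j.choose i' : Nat) : Int)
    else if i' = i ∧ i ≤ j ∧ j < p then ((j.choose i : Nat) : Int) else 0

theorem loopJ (N M i : Nat) (hi1 : 2 ≤ i) (hiN : i ≤ N) :
    ∀ (c : Nat), i + c ≤ M + 1 →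
    (PySem.List.pyRange (i:Int) ((i:Int) + (c:Int)) 1).foldl (fun t j =>
      (PySem.List.pyRange (i:Int) (j+1) 1).foldl (fun t k =>
        PySem.List.pySetD t (i:Int)
          (PySem.List.pySetD (PySem.List.pyGetD t (i:Int) []) j
            (PySem.List.pyGetD (PySem.List.pyGetD t (i:Int) []) j 0 +
             PySem.List.pyGetD (PySem.List.pyGetD t ((i:Int)-1) []) (k-1) 0))) t)
      (tblF (midF i i) N M)
    = tblF (midF i (i + c)) N M := by
  intro c
  induction c with
  | zero =>
    intro _
    rw [show ((i:Int) + ((0:Nat):Int)) = (i:Int) by push_cast; ring,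
      PySem.List.pyRange_one_eq_nil (le_refl _)]
    simp only [List.foldl_nil, Nat.add_zero]
  | succ c ih =>
    intro hc
    have hsplit : ((i:Int) + ((c+1:Nat):Int)) = ((i:Int) + (c:Int)) + 1 := by push_cast; ring
    rw [hsplit, PySem.List.pyRange_one_succ_right (by omega), List.foldl_append, ih (by omega)]
    simp only [List.foldl_cons, List.foldl_nil]
    have hj' : ((i:Int) + (c:Int)) = (((i+c:Nat)):Int) := by push_cast; ring
    rw [hj']
    rw [loopK N M i (i+c) hi1 hiN (by omega) _ _
      (fun k hk => by
        rw [PySem.List.mem_pyRange_one] at hk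
        constructor <;> omega)]
    have hval : (midF i (i+c)) i (i+c) = 0 := by
      simp only [midF]
      rw [if_neg (by omega), if_neg (by omega)]
    have hsum : ((PySem.List.pyRange (i:Int) (((i+c:Nat):Int)+1) 1).map
        (fun k => (midF i (i+c)) (i-1) (k-1).toNat)).sum = (((i+c).choose i : Nat) : Int) := by
      rw [PySem.List.pyRange_one]
      rw [show ((((i+c:Nat):Int)+1) - (i:Int)).toNat = c+1 from by omega]
      rw [List.map_map]
      rw [List.map_congr_left (fun t ht => show _ = (((i-1+t).choose (i-1) : Nat) : Int) from by
        simp only [Function.comp]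
        have h1 : (((i:Int) + (t:Int)) - 1).toNat = i-1+t := by omega
        rw [h1]
        simp only [midF]
        rw [if_pos (by omega)])]
      rw [sum_map_range_int, ← Nat.cast_sum]
      congr 1
      rw [sum_range_choose_add (i-1) c]
      congr 1 <;> omega
    rw [hval, hsum, zero_add]
    refine congrArg (fun g => tblF g N M) ?_
    funext i' j'
    simp only [upd2, midF]
    by_cases h : i' = i ∧ j' = i+c
    · obtain ⟨rfl, rfl⟩ := h
      rw [if_pos ⟨rfl, rfl⟩, if_neg (by omega), if_pos (by omega)]
    · rw [if_neg h]
      by_cases hb1 : 1 ≤ i' ∧ i' < i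
      · rw [if_pos hb1, if_pos hb1]
      · rw [if_neg hb1, if_neg hb1]
        by_cases hb2 : i' = i ∧ i ≤ j' ∧ j' < i+c
        · rw [if_pos hb2, if_pos (by omega)]
        · rw [if_neg hb2, if_neg (by omega)]

-- ===== outer i-loop =====
theorem loopI (N M : Nat) (_hN : 1 ≤ N) :
    ∀ (d : Nat), 1 + d ≤ N →
    (PySem.List.pyRange 2 (2 + (d:Int)) 1).foldl (fun t i =>
      (PySem.List.pyRange i ((M:Int)+1) 1).foldl (fun t j =>
        (PySem.List.pyRange i (j+1) 1).foldl (fun t k =>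
          PySem.List.pySetD t i
            (PySem.List.pySetD (PySem.List.pyGetD t i []) j
              (PySem.List.pyGetD (PySem.List.pyGetD t i []) j 0 +
               PySem.List.pyGetD (PySem.List.pyGetD t (i-1) []) (k-1) 0))) t) t)
      (tblF (rowsF 1) N M)
    = tblF (rowsF (1 + d)) N M := by
  intro d
  induction d with
  | zero =>
    intro _
    rw [show ((2:Int) + ((0:Nat):Int)) = 2 from by omega,
      PySem.List.pyRange_one_eq_nil (le_refl _)]
    rfl
  | succ d ih =>
    intro hd
    have hsplit : ((2:Int) + ((d+1:Nat):Int)) = (2 + (d:Int)) + 1 := by push_cast; ring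
    rw [hsplit, PySem.List.pyRange_one_succ_right (by omega), List.foldl_append, ih (by omega)]
    simp only [List.foldl_cons, List.foldl_nil]
    have hi' : ((2:Int) + (d:Int)) = (((2+d:Nat)):Int) := by push_cast; ring
    rw [hi']
    have hstart : tblF (rowsF (1+d)) N M = tblF (midF (2+d) (2+d)) N M := by
      refine congrArg (fun g => tblF g N M) ?_
      funext i' j'
      simp only [rowsF, midF]
      by_cases hb : 1 ≤ i' ∧ i' ≤ 1+d
      · rw [if_pos hb, if_pos (by omega)]
      · rw [if_neg hb, if_neg (by omega), if_neg (by omega)]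
    rw [hstart]
    by_cases hM : 2 + d ≤ M + 1
    · have hc : ((M:Int) + 1) = (((2+d:Nat)):Int) + (((M+1-(2+d):Nat)):Int) := by omega
      rw [hc, loopJ N M (2+d) (by omega) (by omega) (M+1-(2+d)) (by omega)]
      rw [show (2+d) + (M+1-(2+d)) = M+1 from by omega]
      refine tbl_congr _ _ _ _ (fun i' hi'' j hj => ?_)
      simp only [midF, rowsF]
      by_cases hb1 : 1 ≤ i' ∧ i' < 2+d
      · rw [if_pos hb1, if_pos (by omega)]
      · rw [if_neg hb1]
        by_cases hb2 : i' = 2+d ∧ 2+d ≤ j ∧ j < M+1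
        · rw [if_pos hb2, if_pos (by omega), hb2.1]
        · rw [if_neg hb2]
          by_cases hr : 1 ≤ i' ∧ i' ≤ 1+(d+1)
          · rw [if_pos hr]
            have hji : j < i' := by omega
            rw [Nat.choose_eq_zero_of_lt hji]
            simp
          · rw [if_neg hr]
    · rw [PySem.List.pyRange_one_eq_nil (by omega)]
      simp only [List.foldl_nil]
      refine tbl_congr _ _ _ _ (fun i' hi'' j hj => ?_)
      simp only [midF, rowsF]
      by_cases hb1 : 1 ≤ i' ∧ i' < 2+d
      · rw [if_pos hb1, if_pos (by omega)]
      · rw [if_neg hb1, if_neg (by omega)]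
        by_cases hr : 1 ≤ i' ∧ i' ≤ 1+(d+1)
        · rw [if_pos hr]
          have hji : j < i' := by omega
          rw [Nat.choose_eq_zero_of_lt hji]
          simp
        · rw [if_neg hr]

-- ===== A computes the binomial coefficient =====
theorem dp_eq_choose (N M : Nat) (hN : 1 ≤ N) :
    dp (N:Int) (M:Int) = ((M.choose N : Nat) : Int) := by
  simp only [dp]
  have hinit : (PySem.List.pyRange 0 ((N:Int)+1) 1).map
      (fun _ => (PySem.List.pyRange 0 ((M:Int)+1) 1).map (fun _ => (0:Int)))
      = tblF (fun _ _ => 0) N M := by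
    rw [PySem.List.pyRange_one, PySem.List.pyRange_one]
    rw [show (((N:Int)+1) - 0).toNat = N+1 from by omega,
      show (((M:Int)+1) - 0).toNat = M+1 from by omega]
    simp only [tblF, List.map_map, Function.comp_def]
  rw [hinit, loop1 N M hN]
  rw [show ((N:Int)+1) = 2 + (((N-1:Nat)):Int) from by omega,
    loopI N M hN (N-1) (by omega), show 1 + (N-1) = N from by omega]
  rw [tbl_get _ _ _ _ _ (le_refl N) (le_refl M)]
  simp only [rowsF]
  rw [if_pos ⟨hN, le_refl N⟩]

-- ===== B computes the binomial coefficient =====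
theorem dp_alt_loop (s : Nat) : ∀ (c : Nat),
    (PySem.List.pyRange 0 (c:Int) 1).foldl
      (fun r i => PySem.Int.floordiv (r * ((s:Int) + i + 1)) (i + 1)) 1
    = (((s+c).choose c : Nat) : Int) := by
  intro c
  induction c with
  | zero =>
    rw [show (((0:Nat)):Int) = 0 from by norm_cast, PySem.List.pyRange_one_eq_nil (le_refl _)]
    simp
  | succ c ih =>
    rw [show (((c+1:Nat)):Int) = ((c:Nat):Int) + 1 from by push_cast; ring,
      PySem.List.pyRange_one_succ_right (by omega), List.foldl_append, ih]
    simp only [List.foldl_cons, List.foldl_nil]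
    rw [show ((s:Int) + (c:Int) + 1) = (((s+c+1:Nat)):Int) from by push_cast; ring,
      show ((c:Int) + 1) = (((c+1:Nat)):Int) from by push_cast; ring,
      ← Nat.cast_mul, PySem.Int.floordiv_natCast]
    have hmul : (s+c).choose c * (s+c+1) = (s+c+1).choose (c+1) * (c+1) := by
      rw [mul_comm]
      exact Nat.add_one_mul_choose_eq (s+c) c
    rw [hmul, Nat.mul_div_cancel _ (by omega : 0 < c+1)]
    rfl

theorem dp_alt_eq_choose (N M : Nat) :
    dp_alt (N:Int) (M:Int) = ((M.choose N : Nat) : Int) := by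
  by_cases h : M < N
  · simp only [dp_alt]
    rw [if_pos (by exact_mod_cast h), Nat.choose_eq_zero_of_lt h]
    simp
  · simp only [dp_alt]
    rw [if_neg (by omega)]
    have hs : ((M:Int) - (N:Int)) = (((M-N:Nat)):Int) := by omega
    simp only [hs]
    rw [dp_alt_loop (M-N) N, show M-N+N = M from by omega]

-- ===== VERDICT (by name: the statement is the Claim_ definition above) =====
theorem dp_spec : Claim_unchanged_dp := by
  intro n m _ hpre hD
  obtain ⟨hn, hm, h0⟩ := hpre
  have hn1 : 1 ≤ n := by
    rcases lt_or_eq_of_le hn with h | h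
    · omega
    · exfalso; exact hD ⟨h.symm, h0 h.symm⟩
  obtain ⟨N, rfl⟩ : ∃ N : Nat, n = (N:Int) := ⟨n.toNat, (Int.toNat_of_nonneg hn).symm⟩
  obtain ⟨M, rfl⟩ : ∃ M : Nat, m = (M:Int) := ⟨m.toNat, (Int.toNat_of_nonneg hm).symm⟩
  rw [dp_eq_choose N M (by exact_mod_cast hn1), dp_alt_eq_choose N M]

theorem dp_changed : Claim_changed_dp := by unfold Claim_changed_dp; decide

theorem dp_tight : Claim_exact_dp := by
  intro n m _ _ hD
  obtain ⟨rfl, rfl⟩ := hD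
  decide
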